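-- pv_equiv track=rewrite | github.com/Nick36/parallelizing-ILP-in-ASP | source code/logic_program.py | getBrandNewVariables
-- ===== SOURCE A (Python) =====
-- import string
--
-- def getBrandNewVariables(x) :
--     """Returns x variables but doesn't affect the counter.
--
--     The variables start with "A"
--     """
--     ret = []
--     letters = string.ascii_uppercase
--     n = len(letters)
--     for i in range(0, x):
--         t  = ''
--         while i >= 0:
--             t = t + letters[(i % n)]
--             i -= n
--         ret.append(t)
--     return ret
-- ===== SOURCE B (Python) =====
-- import string
--
-- def getBrandNewVariables(x):
--     """Returns x variables but doesn't affect the counter.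
--
--     The variables start with "A"
--     """
--     return [string.ascii_uppercase[i % 26] * (i // 26 + 1) for i in range(x)]
-- ===== Notes on version B (the rewrite author's own statement) =====
-- stated objective: simpler
-- what changed: Replaces the inner while loop that repeatedly appends letters[i % 26] (invariant under i -= 26) by the closed form letters[i % 26] * (i // 26 + 1) in a single comprehension.
import Mathlib
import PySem

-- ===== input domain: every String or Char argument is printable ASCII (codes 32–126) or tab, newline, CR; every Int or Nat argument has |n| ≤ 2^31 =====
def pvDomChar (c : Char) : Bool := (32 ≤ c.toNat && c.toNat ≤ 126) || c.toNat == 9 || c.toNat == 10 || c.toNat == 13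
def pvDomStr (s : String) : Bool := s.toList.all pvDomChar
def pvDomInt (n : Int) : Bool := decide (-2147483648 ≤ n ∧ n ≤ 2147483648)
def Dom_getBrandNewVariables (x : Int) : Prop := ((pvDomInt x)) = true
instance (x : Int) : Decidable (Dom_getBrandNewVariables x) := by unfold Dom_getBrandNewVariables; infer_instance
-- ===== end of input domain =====

-- B replaces A's inner while loop (which appends letters[i % 26] once per 26-step) by the
-- closed form letters[i % 26] * (i // 26 + 1) in a single comprehension (objective: simpler).

-- ===== PORT A =====
-- string.ascii_uppercase
def pvLetters : List Char := "ABCDEFGHIJKLMNOPQRSTUVWXYZ".toList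

-- the inner 'while i >= 0: t = t + letters[i % n]; i -= n' (n = 26); the index i % 26 is
-- always in [0, 26), so the list lookup is exact (getD default never used)
def pvInnerA (i : Int) (t : List Char) : List Char :=
  if 0 ≤ i then
    pvInnerA (i - 26) (t ++ [pvLetters.getD (PySem.Int.mod i 26).toNat 'A'])
  else t
termination_by (i + 26).toNat
decreasing_by omega

def getBrandNewVariables (x : Int) : List String :=
  (PySem.List.pyRange 0 x 1).foldl (fun ret i => ret ++ [String.ofList (pvInnerA i [])]) []

-- ===== PORT B =====
def getBrandNewVariables_alt (x : Int) : List String :=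
  (PySem.List.pyRange 0 x 1).map (fun i =>
    String.ofList (List.replicate ((PySem.Int.floordiv i 26) + 1).toNat
      (pvLetters.getD (PySem.Int.mod i 26).toNat 'A')))

-- ===== PRECONDITION & SPEC =====
def Spec_getBrandNewVariables (x : Int) (out : List String) : Prop := out = getBrandNewVariables_alt x
instance (x : Int) (out : List String) : Decidable (Spec_getBrandNewVariables x out) := by unfold Spec_getBrandNewVariables; infer_instance

-- ===== CLAIM (what is proved, stated in full; the proofs are below) =====
def Claim_equal_getBrandNewVariables : Prop := ∀ (x : Int), Dom_getBrandNewVariables x → Spec_getBrandNewVariables x (getBrandNewVariables x)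

-- ===== LEMMAS AND PROOFS =====

-- the inner while loop computes exactly the closed form: (i // 26 + 1) copies of letters[i % 26]
theorem pvInnerA_closed (i : Int) (hi : 0 ≤ i) (t : List Char) :
    pvInnerA i t =
      t ++ List.replicate ((PySem.Int.floordiv i 26) + 1).toNat
            (pvLetters.getD (PySem.Int.mod i 26).toNat 'A') := by
  have hmod : ∀ a : Int, PySem.Int.mod a 26 = a % 26 := fun a =>
    PySem.Int.mod_eq_emod_of_pos (by omega)
  have hdiv : ∀ a : Int, PySem.Int.floordiv a 26 = a / 26 := fun a =>
    PySem.Int.floordiv_eq_ediv_of_pos (by omega)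
  induction i, t using pvInnerA.induct with
  | case1 i t hpos ih =>
    rw [pvInnerA, if_pos hpos]
    by_cases h26 : 26 ≤ i
    · rw [ih (by omega)]
      simp only [hmod, hdiv]
      have hm : (i - 26) % 26 = i % 26 := by omega
      have hn : (i / 26 + 1).toNat = ((i - 26) / 26 + 1).toNat + 1 := by omega
      rw [hm, hn, List.replicate_succ]
      simp
    · rw [pvInnerA, if_neg (by omega)]
      simp only [hmod, hdiv]
      have hd : i / 26 = 0 := by omega
      have hm : i % 26 = i := by omega
      rw [hd, hm]
      simp
  | case2 i t hneg => omega

theorem foldl_map_eq (l : List Int) (acc : List String) (h : ∀ i ∈ l, 0 ≤ i) :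
    l.foldl (fun ret i => ret ++ [String.ofList (pvInnerA i [])]) acc =
      acc ++ l.map (fun i =>
        String.ofList (List.replicate ((PySem.Int.floordiv i 26) + 1).toNat
          (pvLetters.getD (PySem.Int.mod i 26).toNat 'A'))) := by
  induction l generalizing acc with
  | nil => simp
  | cons a l ih =>
    simp only [List.foldl_cons, List.map_cons]
    rw [ih _ (fun i hm => h i (List.mem_cons_of_mem _ hm)),
        pvInnerA_closed a (h a (List.mem_cons_self ..)) []]
    simp

-- ===== VERDICT (by name: the statement is the Claim_ definition above) =====
theorem getBrandNewVariables_spec : Claim_equal_getBrandNewVariables := by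
  intro x _
  show _ = _
  unfold getBrandNewVariables getBrandNewVariables_alt
  rw [foldl_map_eq _ [] (fun i hm => ((PySem.List.mem_pyRange_one).1 hm).1)]
  simp
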